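-- pv_equiv track=rewrite | github.com/Cigilipuf/whitehathackerai | src/tools/scanners/waf_strategy.py | _whitespace_variation
-- ===== SOURCE A (Python) =====
-- def _whitespace_variation(payload: str) -> str:
--     """Replace spaces with alternative whitespace."""
--     alternatives = ["\t", "\n", "\r\n", "/**/", "+", "%09", "%0a"]
--     result = payload
--     idx = 0
--     while " " in result:
--         result = result.replace(" ", alternatives[idx % len(alternatives)], 1)
--         idx += 1
--     return result
-- ===== SOURCE B (Python) =====
-- def _whitespace_variation(payload: str) -> str:
--     """Replace spaces with alternative whitespace."""
--     alternatives = ["\t", "\n", "\r\n", "/**/", "+", "%09", "%0a"]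
--     parts = payload.split(' ')
--     result = parts[0]
--     for i, seg in enumerate(parts[1:]):
--         result += alternatives[i % len(alternatives)] + seg
--     return result
-- ===== Notes on version B (the rewrite author's own statement) =====
-- stated objective: alternative
-- what changed: A repeatedly rescans the string and replaces one space at a time in a while-loop; B tokenizes on spaces once with split and reassembles in a single pass, inserting the i-th cycling alternative between consecutive pieces.
import Mathlib
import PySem

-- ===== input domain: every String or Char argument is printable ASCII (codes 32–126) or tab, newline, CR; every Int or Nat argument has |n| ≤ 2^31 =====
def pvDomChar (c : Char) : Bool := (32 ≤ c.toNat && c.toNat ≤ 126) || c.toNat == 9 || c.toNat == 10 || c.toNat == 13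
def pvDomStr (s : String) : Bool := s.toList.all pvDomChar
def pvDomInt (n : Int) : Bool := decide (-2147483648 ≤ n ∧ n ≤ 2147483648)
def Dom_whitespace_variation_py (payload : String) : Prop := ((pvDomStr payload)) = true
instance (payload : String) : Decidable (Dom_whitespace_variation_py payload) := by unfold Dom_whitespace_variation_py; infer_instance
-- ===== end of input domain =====

-- B replaces A's rescan-and-single-replace while-loop by one split on ' ' plus one assembly pass (objective: alternative, single split-and-assemble pass).

-- ===== PORT A =====

-- the shared `alternatives` list, as lists of characters
def pvAlts : List (List Char) :=
  [['\t'], ['\n'], ['\r', '\n'], ['/', '*', '*', '/'], ['+'], ['%', '0', '9'], ['%', '0', 'a']]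

-- result.replace(" ", r, 1): replace the FIRST occurrence of the single char ' ' by r (exact:
-- the pattern is one character, so Python's leftmost single replacement is exactly this recursion)
def pvReplFirst (l : List Char) (r : List Char) : List Char :=
  match l with
  | [] => []
  | c :: cs => if c = ' ' then r ++ cs else c :: pvReplFirst cs r

-- termination measure for A's while-loop: the replacement strings contain no space,
-- so each single replacement strictly decreases the number of spaces
theorem pvReplFirst_count_lt (l r : List Char) (hl : ' ' ∈ l) (hr : ' ' ∉ r) :
    (pvReplFirst l r).count ' ' < l.count ' ' := by
  induction l with
  | nil => cases hl
  | cons c cs ih =>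
    by_cases hc : c = ' '
    · subst hc
      simp [pvReplFirst, List.count_append, List.count_eq_zero_of_not_mem hr]
    · rcases List.mem_cons.1 hl with h' | hl
      · exact absurd h'.symm hc
      · simpa [pvReplFirst, hc, List.count_cons] using ih hl

-- A's while-loop: while " " in result: result = result.replace(" ", alternatives[idx % 7], 1); idx += 1
-- (exact: '" " in result' for the one-char string " " is membership of ' ')
def pvALoop (l : List Char) (idx : Nat) : List Char :=
  if h : ' ' ∈ l then
    pvALoop (pvReplFirst l (pvAlts[idx % 7]!)) (idx + 1)
  else l
termination_by l.count ' '
decreasing_by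
  exact pvReplFirst_count_lt l _ h (by
    have h7 : idx % 7 < 7 := Nat.mod_lt _ (by omega)
    set i := idx % 7 with hi
    interval_cases i <;> decide)

def whitespace_variation_py (payload : String) : String :=
  String.ofList (pvALoop payload.toList 0)

-- ===== PORT B =====

-- payload.split(' '): for a single-character separator Python's split is exactly
-- List.splitOn ' ' (empty pieces between/at adjacent separators are kept)
def whitespace_variation_py_alt (payload : String) : String :=
  let parts := List.splitOn ' ' payload.toList
  let result := parts[0]!      -- parts[0]; splitOn never returns [], so this is the first piece
  let result := (PySem.List.enumerate (parts.drop 1)).foldl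
      (fun acc p => acc ++ pvAlts[(p.1.toNat % 7)]! ++ p.2) result
  String.ofList result

-- ===== PRECONDITION & SPEC =====
def Spec_whitespace_variation_py (payload : String) (out : String) : Prop := out = whitespace_variation_py_alt payload
instance (payload : String) (out : String) : Decidable (Spec_whitespace_variation_py payload out) := by unfold Spec_whitespace_variation_py; infer_instance

-- ===== CLAIM (what is proved, stated in full; the proofs are below) =====
def Claim_equal_whitespace_variation_py : Prop := ∀ (payload : String), Dom_whitespace_variation_py payload → Spec_whitespace_variation_py payload (whitespace_variation_py payload)

-- ===== LEMMAS AND PROOFS =====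

-- abstract assembly: insert alternatives[k % 7], alternatives[(k+1) % 7], … between the pieces
def pvAsm : Nat → List (List Char) → List Char
  | _, [] => []
  | k, p :: ps => pvAlts[k % 7]! ++ p ++ pvAsm (k + 1) ps

theorem pvAlts_no_space (k : Nat) : ' ' ∉ pvAlts[k % 7]! := by
  have h7 : k % 7 < 7 := Nat.mod_lt _ (by omega)
  set i := k % 7 with hi
  interval_cases i <;> decide

theorem pvReplFirst_prefix (p rest r : List Char) (hp : ' ' ∉ p) :
    pvReplFirst (p ++ ' ' :: rest) r = p ++ r ++ rest := by
  induction p with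
  | nil => simp [pvReplFirst]
  | cons c cs ih =>
    have hc : c ≠ ' ' := fun h => hp (h ▸ List.mem_cons_self ..)
    have hcs : ' ' ∉ cs := fun h => hp (List.mem_cons_of_mem _ h)
    simp [pvReplFirst, hc, ih hcs]

theorem pvALoop_no_space (l : List Char) (k : Nat) (h : ' ' ∉ l) : pvALoop l k = l := by
  rw [pvALoop]; simp [h]

-- A's loop on an interleaving of space-free pieces is the abstract assembly
theorem pvALoop_intercalate (ps : List (List Char)) :
    ∀ (p : List Char) (k : Nat), ' ' ∉ p → (∀ q ∈ ps, ' ' ∉ q) →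
      pvALoop (List.intercalate [' '] (p :: ps)) k = p ++ pvAsm k ps := by
  induction ps with
  | nil =>
    intro p k hp _
    simp [List.intercalate, pvAsm, pvALoop_no_space _ _ hp]
  | cons q ps ih =>
    intro p k hp hq
    have hq' : ' ' ∉ q := hq q (List.mem_cons_self ..)
    have hps : ∀ r ∈ ps, ' ' ∉ r := fun r hr => hq r (List.mem_cons_of_mem _ hr)
    have hstep : List.intercalate [' '] (p :: q :: ps) =
        p ++ ' ' :: List.intercalate [' '] (q :: ps) := by
      simp [List.intercalate, List.intersperse]
    have hmem : ' ' ∈ List.intercalate [' '] (p :: q :: ps) := by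
      rw [hstep]; exact List.mem_append_right _ (List.mem_cons_self ..)
    rw [pvALoop, dif_pos hmem, hstep, pvReplFirst_prefix _ _ _ hp]
    have hmerge : p ++ pvAlts[k % 7]! ++ List.intercalate [' '] (q :: ps) =
        List.intercalate [' '] ((p ++ pvAlts[k % 7]! ++ q) :: ps) := by
      cases ps with
      | nil => simp [List.intercalate, List.intersperse]
      | cons r rs => simp [List.intercalate, List.intersperse]
    rw [hmerge, ih _ (k + 1) (by
        intro hmem'
        rcases List.mem_append.1 hmem' with hmem'' | hmem''
        · rcases List.mem_append.1 hmem'' with h' | h'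
          · exact hp h'
          · exact pvAlts_no_space k h'
        · exact hq' hmem'') hps]
    simp [pvAsm]

-- every piece of splitOn ' ' is space-free
theorem pv_splitOn_no_space (l : List Char) : ∀ p ∈ List.splitOn ' ' l, ' ' ∉ p := by
  induction l with
  | nil => intro p hp; simp [List.splitOn, List.splitOnP_nil] at hp; simp [hp]
  | cons c cs ih =>
    intro p hp
    rw [List.splitOn, List.splitOnP_cons] at hp
    by_cases hc : c = ' '
    · simp [hc] at hp
      rcases hp with hp | hp
      · simp [hp]
      · exact ih p hp
    · have hbeq : (c == ' ') = false := by simp [hc]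
      rw [hbeq] at hp; simp at hp
      cases hsplit : List.splitOnP (fun b => b == ' ') cs with
      | nil => exact absurd hsplit (List.splitOnP_ne_nil _ _)
      | cons q qs =>
        rw [hsplit] at hp
        simp [List.modifyHead] at hp
        rcases hp with hp | hp
        · subst hp
          intro hmem
          rcases List.mem_cons.1 hmem with h' | hmem
          · exact hc h'.symm
          · exact ih q (by rw [List.splitOn, hsplit]; exact List.mem_cons_self ..) hmem
        · exact ih p (by rw [List.splitOn, hsplit]; exact List.mem_cons_of_mem _ hp)

-- B's fold over the enumerated tail is the abstract assembly
theorem pv_foldl_asm (ps : List (List Char)) :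
    ∀ (n : Nat) (acc : List Char),
      (PySem.List.enumerate ps (n : Int)).foldl
        (fun acc p => acc ++ pvAlts[(p.1.toNat % 7)]! ++ p.2) acc = acc ++ pvAsm n ps := by
  induction ps with
  | nil => intro n acc; simp [PySem.List.enumerate_nil, pvAsm]
  | cons q ps ih =>
    intro n acc
    rw [PySem.List.enumerate_cons]
    have : ((n : Int) + 1) = ((n + 1 : Nat) : Int) := by push_cast; ring
    rw [List.foldl_cons, this, ih]
    simp [pvAsm, Int.toNat_natCast]

theorem whitespace_variation_py_spec : Claim_equal_whitespace_variation_py := by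
  intro payload _
  unfold Spec_whitespace_variation_py
  cases hsplit : List.splitOn ' ' payload.toList with
  | nil => exact absurd hsplit (List.splitOnP_ne_nil _ _)
  | cons p ps =>
    have hl : payload.toList = List.intercalate [' '] (p :: ps) := by
      conv_lhs => rw [← List.intercalate_splitOn payload.toList ' ']
      rw [hsplit]
    have hnos := pv_splitOn_no_space payload.toList
    rw [hsplit] at hnos
    have ha : whitespace_variation_py payload = String.ofList (p ++ pvAsm 0 ps) := by
      unfold whitespace_variation_py
      rw [hl, pvALoop_intercalate ps p 0
            (hnos p (List.mem_cons_self ..))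
            (fun q hq => hnos q (List.mem_cons_of_mem _ hq))]
    have hb : whitespace_variation_py_alt payload = String.ofList (p ++ pvAsm 0 ps) := by
      unfold whitespace_variation_py_alt
      rw [hsplit]
      show String.ofList ((PySem.List.enumerate ps ((0 : Nat) : Int)).foldl
          (fun acc q => acc ++ pvAlts[(q.1.toNat % 7)]! ++ q.2) (p :: ps)[0]!) = _
      rw [pv_foldl_asm ps 0]
      rfl
    rw [ha, hb]
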